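-- pv_equiv track=rewrite | github.com/YoungKwonJo/Analysis | Delphes/v320_WithIsBH/ntuple2hist_cff.py | cut_maker
-- ===== SOURCE A (Python) =====
-- def cut_maker(cuts_):
--   cuts  = {}
--   for i,cut in enumerate(cuts_):
--     if i==0 :
--       cuts["S%d"%i]=cut
--     else:
--       cuts["S%d"%i]= cut+" && "+cuts["S%d"%(i-1)]
--   return cuts
-- ===== SOURCE B (Python) =====
-- def cut_maker(cuts_):
--     lst = list(cuts_)
--     return {"S%d" % i: " && ".join(reversed(lst[:i + 1])) for i in range(len(lst))}
-- ===== Notes on version B (the rewrite author's own statement) =====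
-- stated objective: simpler
-- what changed: Each entry 'S%d' % i is computed independently as ' && '.join(reversed(prefix up to i)) in a dict comprehension, removing A's dependence on the previously inserted dict entry and the special i==0 branch.
import Mathlib
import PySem

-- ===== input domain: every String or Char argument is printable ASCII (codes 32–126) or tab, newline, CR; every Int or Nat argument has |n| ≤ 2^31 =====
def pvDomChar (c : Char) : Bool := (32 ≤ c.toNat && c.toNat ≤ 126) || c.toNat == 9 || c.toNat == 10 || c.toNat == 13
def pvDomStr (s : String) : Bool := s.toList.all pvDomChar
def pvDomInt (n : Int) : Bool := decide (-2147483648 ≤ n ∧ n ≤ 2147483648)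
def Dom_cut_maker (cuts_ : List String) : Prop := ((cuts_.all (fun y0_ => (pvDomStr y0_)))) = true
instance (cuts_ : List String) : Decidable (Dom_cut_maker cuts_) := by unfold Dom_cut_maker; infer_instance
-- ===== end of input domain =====

-- B builds each entry "S%d" % i independently as " && ".join(reversed(prefix)) in a dict
-- comprehension, instead of A's concatenation with the previously inserted dict entry.


-- ===== PORT A =====
-- 'cuts["S%d"%(i-1)]' is ported as getD with default "": the key was inserted on the
-- previous iteration, so Python's KeyError is unreachable and the default is never used.
def cut_maker (cuts_ : List String) : List (String × String) :=
  ((PySem.List.enumerate cuts_ 0).foldl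
    (fun (cuts : PySem.Dict String String) p =>
      if p.1 == 0 then
        cuts.insert ("S" ++ PySem.Int.toStr p.1) p.2
      else
        cuts.insert ("S" ++ PySem.Int.toStr p.1)
          (p.2 ++ " && " ++ cuts.getD ("S" ++ PySem.Int.toStr (p.1 - 1)) ""))
    PySem.Dict.empty).items

-- ===== PORT B =====
-- lst = list(cuts_) is the identity on a Lean list; the dict comprehension is a fold of
-- inserts over range(len(lst)); reversed(lst[:i+1]) is (slice ... ).reverse.
def cut_maker_alt (cuts_ : List String) : List (String × String) :=
  ((PySem.List.pyRange 0 (PySem.List.len cuts_) 1).foldl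
    (fun (d : PySem.Dict String String) i =>
      d.insert ("S" ++ PySem.Int.toStr i)
        (PySem.Str.join " && " (PySem.List.slice cuts_ none (some (i + 1))).reverse))
    PySem.Dict.empty).items

-- ===== PRECONDITION & SPEC =====
def Spec_cut_maker (cuts_ : List String) (out : List (String × String)) : Prop := out = cut_maker_alt cuts_
instance (cuts_ : List String) (out : List (String × String)) : Decidable (Spec_cut_maker cuts_ out) := by unfold Spec_cut_maker; infer_instance

-- ===== CLAIM (what is proved, stated in full; the proofs are below) =====
def Claim_equal_cut_maker : Prop := ∀ (cuts_ : List String), Dom_cut_maker cuts_ → Spec_cut_maker cuts_ (cut_maker cuts_)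

-- ===== LEMMAS AND PROOFS =====

-- the key "S%d" % i and the value of entry i, as both programs produce them
def pvKey (i : Int) : String := "S" ++ PySem.Int.toStr i

def pvVal (xs : List String) (k : Nat) : String :=
  PySem.Str.join " && " ((xs.take (k + 1)).reverse)

theorem digitChar_inj (a b : Nat) (ha : a < 10) (hb : b < 10)
    (h : Nat.digitChar a = Nat.digitChar b) : a = b := by
  interval_cases a <;> interval_cases b <;> simp_all [Nat.digitChar]

theorem toDigits10_inj (m n : Nat) (h : Nat.toDigits 10 m = Nat.toDigits 10 n) : m = n := by
  induction m using Nat.strong_induction_on generalizing n with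
  | _ m ih =>
    by_cases hm : m < 10 <;> by_cases hn : n < 10
    · rw [Nat.toDigits_of_lt_base hm, Nat.toDigits_of_lt_base hn] at h
      simp only [List.cons.injEq, and_true] at h
      exact digitChar_inj m n hm hn h
    · exfalso
      rw [Nat.toDigits_of_lt_base hm, Nat.toDigits_of_base_le (n := n) (by omega) (by omega)] at h
      have hl := congrArg List.length h
      have := @Nat.length_toDigits_pos 10 (n / 10)
      simp only [List.length_append, List.length_cons, List.length_nil] at hl; omega
    · exfalso
      rw [Nat.toDigits_of_lt_base hn, Nat.toDigits_of_base_le (n := m) (by omega) (by omega)] at h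
      have hl := congrArg List.length h
      have := @Nat.length_toDigits_pos 10 (m / 10)
      simp only [List.length_append, List.length_cons, List.length_nil] at hl; omega
    · rw [Nat.toDigits_of_base_le (n := m) (by omega) (by omega),
        Nat.toDigits_of_base_le (n := n) (by omega) (by omega)] at h
      obtain ⟨h1, h2⟩ := List.append_inj' h rfl
      simp only [List.cons.injEq, and_true] at h2
      have e1 : m / 10 = n / 10 := ih (m / 10) (by omega) (n / 10) h1
      have e2 : m % 10 = n % 10 :=
        digitChar_inj _ _ (Nat.mod_lt _ (by omega)) (Nat.mod_lt _ (by omega)) h2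
      omega

theorem pvKey_inj (i j : Int) (hi : 0 ≤ i) (hj : 0 ≤ j) (h : pvKey i = pvKey j) : i = j := by
  have h' : PySem.Int.toChars i = PySem.Int.toChars j := by
    have := congrArg String.toList h
    simpa [pvKey, String.toList_append, PySem.Int.toStr,
      PySem.Int.toList_toStr] using this
  unfold PySem.Int.toChars at h'
  rw [if_neg (by omega), if_neg (by omega)] at h'
  have := toDigits10_inj i.toNat j.toNat h'
  omega

theorem pvVal_succ (xs : List String) (k : Nat) (hk : k + 1 < xs.length) :
    pvVal xs (k + 1) = xs[k + 1] ++ " && " ++ pvVal xs k := by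
  have htake : xs.take (k + 2) = xs.take (k + 1) ++ [xs[k + 1]] := by
    rw [List.take_add_one]
    simp [List.getElem?_eq_getElem hk]
  have hne : (xs.take (k + 1)).reverse ≠ [] := by
    apply List.ne_nil_of_length_pos
    simp only [List.length_reverse, List.length_take]
    omega
  obtain ⟨b, t, hbt⟩ := List.exists_cons_of_ne_nil hne
  apply String.toList_inj.mp
  unfold pvVal
  rw [show k + 1 + 1 = k + 2 by omega, htake]
  simp only [List.reverse_append, List.reverse_singleton, List.singleton_append]
  rw [hbt, PySem.Str.toList_join]
  simp only [List.map_cons, PySem.Chars.join_cons_cons]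
  simp [String.toList_append, PySem.Str.toList_join]

theorem pvKey_nat_inj (a b : Nat) (h : pvKey (a : Int) = pvKey (b : Int)) : a = b := by
  have := pvKey_inj (a : Int) (b : Int) (by omega) (by omega) h
  omega

theorem pvVal_zero (xs : List String) (h : 0 < xs.length) : pvVal xs 0 = xs[0] := by
  apply String.toList_inj.mp
  unfold pvVal
  rw [List.take_one, List.head?_eq_getElem?, List.getElem?_eq_getElem h]
  simp [PySem.Str.toList_join, PySem.Chars.join_singleton]

theorem pvKeys_nodup (k : Nat) :
    ((List.range k).map (fun i : Nat => pvKey (i : Int))).Nodup := by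
  refine List.Nodup.map_on ?_ (List.nodup_range)
  intro a _ b _ h
  exact pvKey_nat_inj a b h

-- A's fold over the first k enumerated elements yields exactly the entries 0..k-1
theorem cut_maker_fold (xs : List String) (k : Nat) (hk : k ≤ xs.length) :
    ((PySem.List.enumerate (xs.take k) 0).foldl
      (fun (cuts : PySem.Dict String String) p =>
        if p.1 == 0 then
          cuts.insert ("S" ++ PySem.Int.toStr p.1) p.2
        else
          cuts.insert ("S" ++ PySem.Int.toStr p.1)
            (p.2 ++ " && " ++ cuts.getD ("S" ++ PySem.Int.toStr (p.1 - 1)) ""))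
      PySem.Dict.empty)
    = PySem.Dict.mk ((List.range k).map (fun i : Nat => (pvKey (i : Int), pvVal xs i))) := by
  induction k with
  | zero =>
    simp [PySem.List.enumerate_nil, PySem.Dict.empty]
  | succ k ih =>
    have hklt : k < xs.length := by omega
    have htake : xs.take (k + 1) = xs.take k ++ [xs[k]] := by
      rw [List.take_add_one]
      simp [List.getElem?_eq_getElem hklt]
    rw [htake, PySem.List.enumerate_append, List.foldl_append, ih (by omega)]
    rw [PySem.List.enumerate_cons, PySem.List.enumerate_nil, List.foldl_cons, List.foldl_nil]
    have hlen : (0 : Int) + (xs.take k).length = (k : Int) := by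
      simp [List.length_take]; omega
    rw [hlen]
    set d := PySem.Dict.mk ((List.range k).map (fun i : Nat => (pvKey (i : Int), pvVal xs i))) with hd
    have hkeys : d.keys = (List.range k).map (fun i : Nat => pvKey (i : Int)) := by
      rw [hd]
      simp [PySem.Dict.keys]
    have hnotmem : ("S" ++ PySem.Int.toStr (k : Int)) ∉ d.keys := by
      rw [hkeys]
      intro hmem
      obtain ⟨i, hi, hik⟩ := List.mem_map.mp hmem
      have := pvKey_nat_inj i k hik
      have := List.mem_range.mp hi
      omega
    have hcon : d.contains ("S" ++ PySem.Int.toStr (k : Int)) = false := by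
      cases hc : d.contains ("S" ++ PySem.Int.toStr (k : Int)) with
      | false => rfl
      | true => exact absurd ((PySem.Dict.contains_iff_mem_keys d _).mp hc) hnotmem
    by_cases hk0 : k = 0
    · subst hk0
      simp only [Nat.cast_zero] at hcon
      simp only [Nat.cast_zero, beq_self_eq_true, if_true]
      apply PySem.Dict.ext
      rw [PySem.Dict.items_insert_of_not_contains d _ hcon]
      rw [hd]
      simp [pvKey, pvVal_zero xs hklt, List.range_succ]
    · rw [if_neg (by simp only [beq_iff_eq]; omega)]
      have hgetD : d.getD ("S" ++ PySem.Int.toStr ((k : Int) - 1)) "" = pvVal xs (k - 1) := by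
        have hcast : (k : Int) - 1 = ((k - 1 : Nat) : Int) := by omega
        rw [hcast]
        apply PySem.Dict.getD_of_mem_items d
        · rw [hd]
          show (pvKey ((k - 1 : Nat) : Int), pvVal xs (k - 1)) ∈ _
          exact List.mem_map.mpr ⟨k - 1, List.mem_range.mpr (by omega), rfl⟩
        · rw [hkeys]; exact pvKeys_nodup k
      rw [hgetD]
      apply PySem.Dict.ext
      rw [PySem.Dict.items_insert_of_not_contains d _ hcon]
      have hval : pvVal xs k = xs[k] ++ " && " ++ pvVal xs (k - 1) := by
        have h2 := pvVal_succ xs (k - 1) (by omega)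
        simp only [show k - 1 + 1 = k by omega] at h2
        exact h2
      rw [hd]
      simp [pvKey, List.range_succ, hval]

theorem cut_maker_alt_eq (xs : List String) :
    cut_maker_alt xs = (List.range xs.length).map (fun i : Nat => (pvKey (i : Int), pvVal xs i)) := by
  unfold cut_maker_alt
  rw [PySem.Dict.items_foldl_insert_fresh
      (PySem.List.pyRange 0 (PySem.List.len xs) 1)
      (fun i => "S" ++ PySem.Int.toStr i)
      (fun i => PySem.Str.join " && " (PySem.List.slice xs none (some (i + 1))).reverse)
      PySem.Dict.empty
      (fun a _ => PySem.Dict.contains_empty _)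
      (by
        refine List.Nodup.map_on ?_ (PySem.List.nodup_pyRange_one 0 _)
        intro a ha b hb h
        have ha' := (PySem.List.mem_pyRange_one.mp ha).1
        have hb' := (PySem.List.mem_pyRange_one.mp hb).1
        exact pvKey_inj a b ha' hb' h)]
  rw [show PySem.List.len xs = (xs.length : Int) from PySem.List.len_eq xs,
    PySem.List.pyRange_one 0 (xs.length : Int)]
  simp only [List.map_map, PySem.Dict.empty, List.nil_append,
    Int.sub_zero, Int.toNat_natCast]
  apply List.map_congr_left
  intro i hi
  have hsl : PySem.List.slice xs none (some ((i : Int) + 1)) = xs.take (i + 1) := by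
    have := PySem.List.slice_to xs (b := (i : Int) + 1) (by omega)
    rw [this]
    congr 1
  simp only [Function.comp, zero_add, hsl, pvKey, pvVal]

-- ===== VERDICT (by name: the statement is the Claim_ definition above) =====
theorem cut_maker_spec : Claim_equal_cut_maker := by
  intro xs _
  show cut_maker xs = cut_maker_alt xs
  rw [cut_maker_alt_eq]
  unfold cut_maker
  rw [show xs = xs.take xs.length by simp, cut_maker_fold xs xs.length (by simp)]
  simp
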